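-- pv_equiv track=rewrite | github.com/xorphitus/adventofcode | 2024/day05.py | parse
-- ===== SOURCE A (Python) =====
-- def parse(lines):
--     isDependencyPart = True
--     deps = []
--     pages = []
--     for line in lines:
--         line = line.strip()
--         if isDependencyPart:
--             if line == "":
--                 isDependencyPart = False
--                 continue
--             pre, post = line.split("|")
--             deps.append([pre, post])
--         else:
--             pages.append(line.split(","))
--     return deps, pages
-- ===== SOURCE B (Python) =====
-- def parse(lines):
--     stripped = [line.strip() for line in lines]
--     try:
--         i = stripped.index("")
--     except ValueError:
--         i = len(stripped)
--     deps = []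
--     for s in stripped[:i]:
--         pre, post = s.split("|")
--         deps.append([pre, post])
--     pages = [s.split(",") for s in stripped[i + 1:]]
--     return deps, pages
-- ===== Notes on version B (the rewrite author's own statement) =====
-- stated objective: simpler
-- what changed: Replaces the single stateful loop with a boolean mode flag by: strip all lines once, locate the first blank line's index, then build deps from the prefix and pages from the suffix in two independent comprehension-style passes.
import Mathlib
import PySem

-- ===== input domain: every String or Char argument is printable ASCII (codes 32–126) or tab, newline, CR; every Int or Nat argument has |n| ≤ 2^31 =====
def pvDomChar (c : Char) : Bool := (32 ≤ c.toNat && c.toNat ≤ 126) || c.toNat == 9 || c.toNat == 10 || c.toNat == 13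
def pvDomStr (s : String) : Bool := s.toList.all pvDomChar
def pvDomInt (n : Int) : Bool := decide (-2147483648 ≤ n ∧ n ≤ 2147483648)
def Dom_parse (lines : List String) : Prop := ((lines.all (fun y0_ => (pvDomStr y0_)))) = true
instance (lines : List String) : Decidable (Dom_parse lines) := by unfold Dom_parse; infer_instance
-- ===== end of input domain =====

-- B changes the single stateful mode-flag loop into locating the blank-line separator once and two independent passes (simpler); equivalence is about the return value.

-- s.split(sep) for a nonempty literal sep, shared by both ports: PySem.Str.split? is none
-- only for sep = "", so the default is never taken here.
def pySplit (s sep : String) : List String := (PySem.Str.split? s sep).getD [s]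

-- ===== PORT A =====
-- state loop: (isDependencyPart, deps, pages); `pre, post = line.split("|")` raises ValueError
-- when the split has ≠ 2 pieces — those inputs are outside Pre_parse (the `_ =>` arm is unreachable there).
def parseGo : List String → Bool → List (List String) → List (List String) → List (List String) × List (List String)
  | [], _, deps, pages => (deps, pages)
  | l :: rest, isDep, deps, pages =>
      let line := PySem.Str.strip l
      if isDep then
        if line = "" then parseGo rest false deps pages
        else
          match pySplit line "|" with
          | [pre, post] => parseGo rest true (deps ++ [[pre, post]]) pages
          | _ => parseGo rest true deps pages
      else parseGo rest false deps (pages ++ [pySplit line ","])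

def parse (lines : List String) : List (List String) × List (List String) :=
  parseGo lines true [] []

-- ===== PORT B =====
-- a deps row; the `_ =>` arm is the ValueError of `pre, post = s.split("|")`, outside Pre_parse
def depRow (s : String) : List String :=
  match pySplit s "|" with
  | [pre, post] => [pre, post]
  | _ => []

-- `stripped.index("")` with the try/except defaulting to len(stripped) is List.idxOf
-- (which returns the length when "" is absent — exactly the except branch).
def parse_alt (lines : List String) : List (List String) × List (List String) :=
  let stripped := lines.map (fun l => PySem.Str.strip l)
  let i := stripped.idxOf ""
  let deps := (stripped.take i).map depRow
  let pages := (stripped.drop (i + 1)).map (fun s => pySplit s ",")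
  (deps, pages)

-- ===== PRECONDITION & SPEC =====
-- Pre_parse excludes exactly the inputs where Python A raises ValueError: some stripped line
-- before the first blank stripped line does not split on "|" into exactly two pieces.
def Pre_parse (lines : List String) : Prop :=
  ∀ s ∈ (lines.map (fun l => PySem.Str.strip l)).takeWhile (fun l => l ≠ ""),
    (pySplit s "|").length = 2
instance (lines : List String) : Decidable (Pre_parse lines) := by unfold Pre_parse; infer_instance

def pvWitness_parse : List String := ["1|2", " 3|4 ", "", "5,6", "7"]

def Spec_parse (lines : List String) (out : List (List String) × List (List String)) : Prop := out = parse_alt lines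
instance (lines : List String) (out : List (List String) × List (List String)) : Decidable (Spec_parse lines out) := by unfold Spec_parse; infer_instance

-- ===== CLAIM (what is proved, stated in full; the proofs are below) =====
def Claim_equal_parse : Prop := ∀ (lines : List String), Dom_parse lines → Pre_parse lines → Spec_parse lines (parse lines)

-- ===== LEMMAS AND PROOFS =====

-- pages mode: once the flag is off, A only appends comma-splits of stripped lines
theorem parseGo_false (ls : List String) (deps pages : List (List String)) :
    parseGo ls false deps pages
      = (deps, pages ++ ls.map (fun l => pySplit (PySem.Str.strip l) ",")) := by
  induction ls generalizing pages with
  | nil => simp [parseGo]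
  | cons l rest ih => simp [parseGo, ih]

-- deps mode: A in the flag-on state computes exactly B's take/drop decomposition
theorem parseGo_true (ls : List String) (deps pages : List (List String))
    (h : ∀ s ∈ (ls.map (fun l => PySem.Str.strip l)).takeWhile (fun l => l ≠ ""),
        (pySplit s "|").length = 2) :
    parseGo ls true deps pages
      = (deps ++ (((ls.map (fun l => PySem.Str.strip l)).take
            ((ls.map (fun l => PySem.Str.strip l)).idxOf "")).map depRow),
         pages ++ (((ls.map (fun l => PySem.Str.strip l)).drop
            ((ls.map (fun l => PySem.Str.strip l)).idxOf "" + 1)).map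
              (fun s => pySplit s ","))) := by
  induction ls generalizing deps with
  | nil => simp [parseGo]
  | cons l rest ih =>
      by_cases hs : PySem.Str.strip l = ""
      · simp only [parseGo, hs, List.map_cons, List.idxOf_cons]
        rw [parseGo_false]
        simp
      · have hpred : (fun l => decide (l ≠ "")) (PySem.Str.strip l) = true := by
          simp [hs]
        have hhead : (pySplit (PySem.Str.strip l) "|").length = 2 := by
          apply h
          simp only [List.map_cons, List.takeWhile_cons, hpred, if_pos]
          exact List.mem_cons_self
        have htail : ∀ s ∈ (rest.map (fun l => PySem.Str.strip l)).takeWhile (fun l => l ≠ ""),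
            (pySplit s "|").length = 2 := by
          intro s hsmem
          apply h
          simp only [List.map_cons, List.takeWhile_cons, hpred, if_pos]
          exact List.mem_cons_of_mem _ hsmem
        obtain ⟨pre, post, hm⟩ := List.length_eq_two.mp hhead
        simp only [parseGo, if_neg hs, hm]
        rw [ih _ htail]
        simp [hs, depRow, hm, List.take_succ_cons]

-- ===== VERDICT (by name: the statement is the Claim_ definition above) =====
theorem parse_spec : Claim_equal_parse := by
  intro lines _ hpre
  unfold Spec_parse parse parse_alt
  rw [parseGo_true lines [] [] hpre]
  simp
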